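-- pv_equiv track=rewrite | github.com/alderban107/hypixel-skyblock | tools/sbxp.py | calc_class_levels_sbxp
-- ===== SOURCE A (Python) =====
-- DUNGEON_XP_THRESHOLDS = [
--     0, 50, 125, 235, 395, 625, 955, 1425, 2095, 3045, 4385,
--     6275, 8940, 12700, 17960, 25340, 35640, 50040, 70040, 97640, 135640,
--     188140, 259640, 356640, 488640, 668640, 911640, 1239640, 1684640, 2284640, 3084640,
--     4149640, 5559640, 7459640, 9959640, 13259640, 17559640, 23159640, 30359640, 39559640, 51559640,
--     66559640, 85559640, 109559640, 139559640, 177559640, 225559640, 285559640, 360559640, 453559640, 569809640,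
-- ]
--
-- def xp_to_level(xp, thresholds, max_level=None):
--     """Convert XP to level using cumulative thresholds."""
--     level = 0
--     for i, threshold in enumerate(thresholds):
--         if xp >= threshold:
--             level = i
--         else:
--             break
--     if max_level:
--         level = min(level, max_level)
--     return level
--
-- def calc_class_levels_sbxp(member):
--     """Calculate SBXP from dungeon class levels."""
--     classes = member.get("dungeons", {}).get("player_classes", {})
--     total_sbxp = 0
--     details = []
--     for cls_name in ["healer", "mage", "berserk", "archer", "tank"]:
--         cls_xp = classes.get(cls_name, {}).get("experience", 0)
--         level = xp_to_level(cls_xp, DUNGEON_XP_THRESHOLDS, 50)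
--         sbxp = level * 4
--         total_sbxp += sbxp
--         details.append((cls_name, level, sbxp))
--
--     return total_sbxp, 1000, details
-- ===== SOURCE B (Python) =====
-- DUNGEON_XP_THRESHOLDS = [
--     0, 50, 125, 235, 395, 625, 955, 1425, 2095, 3045, 4385,
--     6275, 8940, 12700, 17960, 25340, 35640, 50040, 70040, 97640, 135640,
--     188140, 259640, 356640, 488640, 668640, 911640, 1239640, 1684640, 2284640, 3084640,
--     4149640, 5559640, 7459640, 9959640, 13259640, 17559640, 23159640, 30359640, 39559640, 51559640,
--     66559640, 85559640, 109559640, 139559640, 177559640, 225559640, 285559640, 360559640, 453559640, 569809640,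
-- ]
--
--
-- def _class_level(xp):
--     """Level for xp: binary search (bisect_right) on the sorted thresholds, clamped to [0, 50]."""
--     lo, hi = 0, len(DUNGEON_XP_THRESHOLDS)
--     while lo < hi:
--         mid = (lo + hi) // 2
--         if xp >= DUNGEON_XP_THRESHOLDS[mid]:
--             lo = mid + 1
--         else:
--             hi = mid
--     return min(max(lo - 1, 0), 50)
--
--
-- def _class_entry(classes, cls_name):
--     level = _class_level(classes.get(cls_name, {}).get("experience", 0))
--     return (cls_name, level, level * 4)
--
--
-- def calc_class_levels_sbxp(member):
--     """Calculate SBXP from dungeon class levels."""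
--     classes = member.get("dungeons", {}).get("player_classes", {})
--     details = [_class_entry(classes, c) for c in ["healer", "mage", "berserk", "archer", "tank"]]
--     return sum(s for _, _, s in details), 1000, details
-- ===== Notes on version B (the rewrite author's own statement) =====
-- stated objective: alternative
-- what changed: xp_to_level's linear scan-with-break over the threshold table is replaced by a hand-written bisect_right binary search with a [0,50] clamp, and the accumulator loop over the five classes by a map building the details list plus a sum over it.
import Mathlib
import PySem

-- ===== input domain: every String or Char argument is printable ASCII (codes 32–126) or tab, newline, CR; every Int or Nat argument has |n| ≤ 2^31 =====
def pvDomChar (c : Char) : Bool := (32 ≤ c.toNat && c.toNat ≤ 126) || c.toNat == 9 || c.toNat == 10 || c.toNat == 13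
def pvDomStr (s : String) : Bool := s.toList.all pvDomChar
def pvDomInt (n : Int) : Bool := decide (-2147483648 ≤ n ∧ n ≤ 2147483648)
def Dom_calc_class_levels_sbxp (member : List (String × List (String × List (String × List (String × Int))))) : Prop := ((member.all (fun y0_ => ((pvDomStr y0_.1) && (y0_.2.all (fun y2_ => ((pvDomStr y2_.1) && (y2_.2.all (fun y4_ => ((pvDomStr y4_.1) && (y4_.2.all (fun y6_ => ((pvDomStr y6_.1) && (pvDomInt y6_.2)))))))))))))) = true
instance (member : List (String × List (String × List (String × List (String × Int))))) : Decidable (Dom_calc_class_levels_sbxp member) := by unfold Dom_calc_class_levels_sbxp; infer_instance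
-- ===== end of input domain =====

-- B replaces A's linear threshold scan (break on first exceeded threshold) by a hand-written
-- binary search and A's accumulator loop by a map + sum (alternative decomposition, same result).

-- shared module context: the threshold table and dict.get(k, default) (first match on the assoc list)
def DUNGEON_XP_THRESHOLDS : List Int := [
    0, 50, 125, 235, 395, 625, 955, 1425, 2095, 3045, 4385,
    6275, 8940, 12700, 17960, 25340, 35640, 50040, 70040, 97640, 135640,
    188140, 259640, 356640, 488640, 668640, 911640, 1239640, 1684640, 2284640, 3084640,
    4149640, 5559640, 7459640, 9959640, 13259640, 17559640, 23159640, 30359640, 39559640, 51559640,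
    66559640, 85559640, 109559640, 139559640, 177559640, 225559640, 285559640, 360559640, 453559640, 569809640]

def pvGetD {ν : Type} (d : List (String × ν)) (k : String) (dflt : ν) : ν :=
  (d.lookup k).getD dflt

-- ===== PORT A =====
-- 'level = 0; for i, threshold in enumerate(thresholds): if xp >= threshold: level = i else: break'
def xpToLevelLoop (xp : Int) : List (Int × Int) → Int → Int
  | [], level => level
  | (i, t) :: rest, level => if xp ≥ t then xpToLevelLoop xp rest i else level

def xp_to_level (xp : Int) (thresholds : List Int) (max_level : Option Int) : Int :=
  let level := xpToLevelLoop xp (PySem.List.enumerate thresholds) 0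
  match max_level with
  | none => level
  | some m => if m ≠ 0 then min level m else level   -- 'if max_level:' (None and 0 are falsy)

def calc_class_levels_sbxp (member : List (String × List (String × List (String × List (String × Int))))) : Int × Int × (List (String × Int × Int)) :=
  let classes := pvGetD (pvGetD member "dungeons" []) "player_classes" []
  let r := ["healer", "mage", "berserk", "archer", "tank"].foldl
    (fun (acc : Int × List (String × Int × Int)) cls_name =>
      let cls_xp := pvGetD (pvGetD classes cls_name []) "experience" 0
      let level := xp_to_level cls_xp DUNGEON_XP_THRESHOLDS (some 50)
      let sbxp := level * 4
      (acc.1 + sbxp, acc.2 ++ [(cls_name, level, sbxp)]))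
    (0, [])
  (r.1, 1000, r.2)

-- ===== PORT B =====
-- 'while lo < hi: mid = (lo+hi)//2; …' — bisect_right by hand; the index (lo+hi)//2 is always in range,
-- so the .getD 0 default is never taken (exact port of the in-range list indexing)
def bsLoop (xp : Int) (lo hi : Nat) : Nat :=
  if lo < hi then
    if xp ≥ DUNGEON_XP_THRESHOLDS.getD ((lo + hi) / 2) 0 then bsLoop xp ((lo + hi) / 2 + 1) hi
    else bsLoop xp lo ((lo + hi) / 2)
  else lo
termination_by hi - lo
decreasing_by all_goals omega

def pvClassLevel (xp : Int) : Int :=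
  let lo := bsLoop xp 0 DUNGEON_XP_THRESHOLDS.length
  min (max ((lo : Int) - 1) 0) 50

def pvClassEntry (classes : List (String × List (String × Int))) (cls_name : String) : String × Int × Int :=
  let level := pvClassLevel (pvGetD (pvGetD classes cls_name []) "experience" 0)
  (cls_name, level, level * 4)

def calc_class_levels_sbxp_alt (member : List (String × List (String × List (String × List (String × Int))))) : Int × Int × (List (String × Int × Int)) :=
  let classes := pvGetD (pvGetD member "dungeons" []) "player_classes" []
  let details := ["healer", "mage", "berserk", "archer", "tank"].map (pvClassEntry classes)
  ((details.map (fun t => t.2.2)).sum, 1000, details)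

-- ===== PRECONDITION & SPEC =====
def Spec_calc_class_levels_sbxp (member : List (String × List (String × List (String × List (String × Int))))) (out : Int × Int × (List (String × Int × Int))) : Prop := out = calc_class_levels_sbxp_alt member
instance (member : List (String × List (String × List (String × List (String × Int))))) (out : Int × Int × (List (String × Int × Int))) : Decidable (Spec_calc_class_levels_sbxp member out) := by unfold Spec_calc_class_levels_sbxp; infer_instance

-- ===== CLAIM (what is proved, stated in full; the proofs are below) =====
def Claim_equal_calc_class_levels_sbxp : Prop := ∀ (member : List (String × List (String × List (String × List (String × Int))))), Dom_calc_class_levels_sbxp member → Spec_calc_class_levels_sbxp member (calc_class_levels_sbxp member)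

-- ===== LEMMAS AND PROOFS =====

-- the first element after the takeWhile-prefix fails the predicate
theorem takeWhile_getElem_false {α : Type} (p : α → Bool) (l : List α)
    (h : (l.takeWhile p).length < l.length) :
    p (l[(l.takeWhile p).length]'h) = false := by
  induction l with
  | nil => simp at h
  | cons a t ih =>
    by_cases hp : p a
    · simp [hp] at h ⊢
      exact ih h
    · simp [List.takeWhile_cons, hp]

-- A's scan-with-break computes from the takeWhile-prefix length
theorem xpLoop_eq (xp : Int) (ts : List Int) (s a : Int) :
    xpToLevelLoop xp (PySem.List.enumerate ts s) a =
      if (ts.takeWhile (fun t => decide (xp ≥ t))).length = 0 then a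
      else s + ((ts.takeWhile (fun t => decide (xp ≥ t))).length : Int) - 1 := by
  induction ts generalizing s a with
  | nil => simp [PySem.List.enumerate_nil, xpToLevelLoop]
  | cons t rest ih =>
    rw [PySem.List.enumerate_cons]
    by_cases hp : xp ≥ t
    · rw [show xpToLevelLoop xp ((s, t) :: PySem.List.enumerate rest (s + 1)) a
            = xpToLevelLoop xp (PySem.List.enumerate rest (s + 1)) s by
          simp [xpToLevelLoop, hp]]
      rw [ih]
      have hlen1 : ((t :: rest).takeWhile (fun u => decide (xp ≥ u))).length
          = ((rest).takeWhile (fun u => decide (xp ≥ u))).length + 1 := by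
        rw [List.takeWhile_cons, if_pos (by simpa using hp)]
        simp
      rw [hlen1]
      by_cases h1 : ((rest).takeWhile (fun u => decide (xp ≥ u))).length = 0
      · rw [if_pos h1, if_neg (by omega), h1]
        norm_num
      · rw [if_neg h1, if_neg (by omega)]
        push_cast
        ring
    · rw [show xpToLevelLoop xp ((s, t) :: PySem.List.enumerate rest (s + 1)) a = a by
          simp [xpToLevelLoop, hp]]
      have hlen0 : ((t :: rest).takeWhile (fun u => decide (xp ≥ u))).length = 0 := by
        rw [List.takeWhile_cons, if_neg (by simpa using hp)]
        simp
      rw [hlen0]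
      simp

-- position i is ≤ xp exactly when it lies inside the takeWhile-prefix (uses sortedness of the table)
theorem key_iff (xp : Int) (i : Nat) (hi : i < 51) :
    xp ≥ DUNGEON_XP_THRESHOLDS.getD i 0 ↔
      i < (DUNGEON_XP_THRESHOLDS.takeWhile (fun t => decide (xp ≥ t))).length := by
  have hlen : DUNGEON_XP_THRESHOLDS.length = 51 := by decide
  have hsort : DUNGEON_XP_THRESHOLDS.Pairwise (· < ·) := by decide
  have hile : i < DUNGEON_XP_THRESHOLDS.length := by omega
  set p : Int → Bool := fun t => decide (xp ≥ t) with hpdef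
  set k := (DUNGEON_XP_THRESHOLDS.takeWhile p).length with hkdef
  have hkle : k ≤ 51 := by
    have := (List.takeWhile_prefix (p := p) (l := DUNGEON_XP_THRESHOLDS)).length_le
    omega
  rw [List.getD_eq_getElem _ _ hile]
  constructor
  · intro hxp
    by_contra hik
    rw [Nat.not_lt] at hik
    have hk51 : k < 51 := by omega
    have hfail : p (DUNGEON_XP_THRESHOLDS[k]'(by omega)) = false :=
      takeWhile_getElem_false p DUNGEON_XP_THRESHOLDS (by omega)
    have hklt : xp < DUNGEON_XP_THRESHOLDS[k]'(by omega) := by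
      simpa [hpdef] using hfail
    rcases Nat.lt_or_ge k i with hki | hki
    · have := List.pairwise_iff_getElem.mp hsort k i (by omega) (by omega) hki
      omega
    · have hkeq : k = i := by omega
      subst hkeq; omega
  · intro hik
    have hpre : DUNGEON_XP_THRESHOLDS.takeWhile p <+: DUNGEON_XP_THRESHOLDS :=
      List.takeWhile_prefix p
    have hget : DUNGEON_XP_THRESHOLDS[i]'hile = (DUNGEON_XP_THRESHOLDS.takeWhile p)[i]'hik :=
      Eq.symm (List.IsPrefix.getElem hpre hik)
    have hmem : (DUNGEON_XP_THRESHOLDS.takeWhile p)[i]'hik ∈ DUNGEON_XP_THRESHOLDS.takeWhile p :=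
      List.getElem_mem hik
    have := List.mem_takeWhile_imp hmem
    rw [hget]
    simpa [hpdef] using this

-- binary-search invariant: with lo ≤ k ≤ hi the loop homes in on k
theorem bsLoop_eq (xp : Int) (k : Nat)
    (hk : ∀ i, i < 51 → (xp ≥ DUNGEON_XP_THRESHOLDS.getD i 0 ↔ i < k)) :
    ∀ fuel lo hi, hi - lo ≤ fuel → lo ≤ k → k ≤ hi → hi ≤ 51 → bsLoop xp lo hi = k := by
  intro fuel
  induction fuel with
  | zero =>
    intro lo hi hf h1 h2 h3
    rw [bsLoop, if_neg (by omega)]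
    omega
  | succ n ih =>
    intro lo hi hf h1 h2 h3
    rw [bsLoop]
    by_cases hlh : lo < hi
    · rw [if_pos hlh]
      by_cases hc : xp ≥ DUNGEON_XP_THRESHOLDS.getD ((lo + hi) / 2) 0
      · rw [if_pos hc]
        have hmk : (lo + hi) / 2 < k := (hk _ (by omega)).mp hc
        exact ih ((lo + hi) / 2 + 1) hi (by omega) (by omega) h2 h3
      · rw [if_neg hc]
        have hmk : ¬ (lo + hi) / 2 < k := fun h => hc ((hk _ (by omega)).mpr h)
        exact ih lo ((lo + hi) / 2) (by omega) h1 (by omega) (by omega)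
    · rw [if_neg hlh]
      omega

-- the two level computations agree on every xp
theorem level_eq (xp : Int) :
    xp_to_level xp DUNGEON_XP_THRESHOLDS (some 50) = pvClassLevel xp := by
  have hkle : (DUNGEON_XP_THRESHOLDS.takeWhile (fun t => decide (xp ≥ t))).length ≤ 51 := by
    have h := (List.takeWhile_prefix (p := fun t => decide (xp ≥ t))
      (l := DUNGEON_XP_THRESHOLDS)).length_le
    have hlen : DUNGEON_XP_THRESHOLDS.length = 51 := by decide
    omega
  have hB : pvClassLevel xp =
      min (max (((DUNGEON_XP_THRESHOLDS.takeWhile (fun t => decide (xp ≥ t))).length : Int) - 1) 0) 50 := by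
    unfold pvClassLevel
    show min (max ((bsLoop xp 0 DUNGEON_XP_THRESHOLDS.length : Int) - 1) 0) 50 = _
    rw [show DUNGEON_XP_THRESHOLDS.length = 51 from by decide,
      bsLoop_eq xp _ (key_iff xp) 51 0 51 (by omega) (by omega) hkle (by omega)]
  have hA : xp_to_level xp DUNGEON_XP_THRESHOLDS (some 50) =
      min (if (DUNGEON_XP_THRESHOLDS.takeWhile (fun t => decide (xp ≥ t))).length = 0 then (0 : Int)
           else 0 + ((DUNGEON_XP_THRESHOLDS.takeWhile (fun t => decide (xp ≥ t))).length : Int) - 1) 50 := by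
    unfold xp_to_level
    show (if (50 : Int) ≠ 0
        then min (xpToLevelLoop xp (PySem.List.enumerate DUNGEON_XP_THRESHOLDS) 0) 50
        else xpToLevelLoop xp (PySem.List.enumerate DUNGEON_XP_THRESHOLDS) 0) = _
    rw [if_pos (by norm_num), xpLoop_eq]
  rw [hA, hB]
  split_ifs with h1 <;> omega

-- ===== VERDICT (by name: the statement is the Claim_ definition above) =====
theorem calc_class_levels_sbxp_spec : Claim_equal_calc_class_levels_sbxp := by
  intro member _
  unfold Spec_calc_class_levels_sbxp calc_class_levels_sbxp calc_class_levels_sbxp_alt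
  simp only [List.foldl, List.map, pvClassEntry, level_eq, List.map_cons]
  simp only [Prod.mk.injEq, List.nil_append, List.cons_append, List.sum_cons, List.sum_nil]
  exact ⟨by ring, trivial⟩
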